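-- pv_equiv track=rewrite | github.com/AdityaAgarwal1812/common-data-definitions | src/validation/cross_reference_validator.py | _validate_protocol_to_parameter_refs
-- ===== SOURCE A (Python) =====
-- def _validate_protocol_to_parameter_refs(parameters_data, protocols_data):
--     """Validate protocol group parameter_reference fields point to valid parameters"""
--     errors = []
--
--     # Get all parameter field names
--     parameter_names = set()
--     if 'parameters' in parameters_data:
--         for param in parameters_data['parameters']:
--             field_name = param.get('field_name')
--             if field_name:
--                 parameter_names.add(field_name)
--
--     # Check each protocol group's parameter_reference
--     if 'protocol_groups' in protocols_data:
--         for group in protocols_data['protocol_groups']: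
--             group_name = group.get('group_name', 'Unknown')
--             param_ref = group.get('parameter_reference')
--
--             if param_ref:
--                 if param_ref not in parameter_names:
--                     errors.append(
--                         f"Protocol group '{group_name}' references non-existent parameter '{param_ref}'"
--                     )
--
--     return errors
-- ===== SOURCE B (Python) =====
-- def _validate_protocol_to_parameter_refs(parameters_data, protocols_data):
--     """Validate protocol group parameter_reference fields point to valid parameters"""
--     params = parameters_data.get('parameters', [])
--
--     def defined(ref, ps):
--         # a truthy ref can only match a truthy field_name, so no truthiness filter is needed
--         if not ps:
--             return False
--         return ps[0].get('field_name') == ref or defined(ref, ps[1:])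
--
--     def check(groups):
--         if not groups:
--             return []
--         group, rest = groups[0], groups[1:]
--         ref = group.get('parameter_reference')
--         tail = check(rest)
--         if ref and not defined(ref, params):
--             return [
--                 f"Protocol group '{group.get('group_name', 'Unknown')}' "
--                 f"references non-existent parameter '{ref}'"
--             ] + tail
--         return tail
--
--     return check(protocols_data.get('protocol_groups', []))
-- ===== Notes on version B (the rewrite author's own statement) =====
-- stated objective: alternative
-- what changed: B removes A's index-building first pass (the parameter_names set) and A's iterative accumulator loop: it is written as structural recursion over the group list building the result front-to-back by cons, deciding each reference's existence by a recursive scan of the parameters list.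
import Mathlib
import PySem

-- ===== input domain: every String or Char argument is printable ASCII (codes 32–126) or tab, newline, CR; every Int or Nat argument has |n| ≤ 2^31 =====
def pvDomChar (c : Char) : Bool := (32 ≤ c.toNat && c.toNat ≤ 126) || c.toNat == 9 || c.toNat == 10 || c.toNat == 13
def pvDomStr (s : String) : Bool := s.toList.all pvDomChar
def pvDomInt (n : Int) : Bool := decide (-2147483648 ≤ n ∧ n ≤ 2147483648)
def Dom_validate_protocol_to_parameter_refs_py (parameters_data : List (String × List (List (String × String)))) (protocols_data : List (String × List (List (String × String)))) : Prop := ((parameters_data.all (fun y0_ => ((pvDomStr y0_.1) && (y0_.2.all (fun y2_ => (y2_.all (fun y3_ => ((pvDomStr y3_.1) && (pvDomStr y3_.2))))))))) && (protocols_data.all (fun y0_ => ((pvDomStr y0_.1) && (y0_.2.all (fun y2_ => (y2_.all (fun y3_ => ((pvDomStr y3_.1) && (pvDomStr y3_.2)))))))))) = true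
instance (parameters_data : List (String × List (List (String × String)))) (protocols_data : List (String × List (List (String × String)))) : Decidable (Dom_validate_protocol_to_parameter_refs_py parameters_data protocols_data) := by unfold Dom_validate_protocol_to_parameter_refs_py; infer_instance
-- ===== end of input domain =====

-- B replaces A's set-building pass + iterative accumulator loop by structural recursion
-- over the groups (result built front-to-back by cons), deciding each reference by a
-- recursive scan of the parameters list; objective: alternative decomposition, same values.

-- dict.get(k): first-match lookup in an insertion-ordered association list (exact for Python dicts)
def pvLookup {α : Type} (d : List (String × α)) (k : String) : Option α :=
  (d.find? (fun p => p.1 == k)).map (·.2)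

-- the error message f-string
def pvMsg (group_name param_ref : String) : String :=
  "Protocol group '" ++ group_name ++ "' references non-existent parameter '" ++ param_ref ++ "'"

-- ===== PORT A =====
-- A's first loop: collect truthy field_name values into a set
def pvANames (params : List (List (String × String))) : PySem.Set String :=
  params.foldl (fun s param =>
    match pvLookup param "field_name" with
    | some fn => if fn ≠ "" then PySem.Set.add s fn else s
    | none => s) PySem.Set.empty

def validate_protocol_to_parameter_refs_py (parameters_data : List (String × List (List (String × String)))) (protocols_data : List (String × List (List (String × String)))) : List String :=
  -- `'parameters' in d` followed by `d['parameters']` = match on the first-match lookup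
  let parameter_names : PySem.Set String :=
    match pvLookup parameters_data "parameters" with
    | some params => pvANames params
    | none => PySem.Set.empty
  match pvLookup protocols_data "protocol_groups" with
  | some groups =>
    groups.foldl (fun errors group =>
      let group_name := (pvLookup group "group_name").getD "Unknown"
      match pvLookup group "parameter_reference" with
      | some param_ref =>
        if param_ref ≠ "" then
          if !(PySem.Set.contains parameter_names param_ref) then
            errors ++ [pvMsg group_name param_ref]
          else errors
        else errors
      | none => errors) []
  | none => []

-- ===== PORT B =====
-- `defined(ref, ps)`: recursive scan of the parameters list
def pvDefined (ref : String) (ps : List (List (String × String))) : Bool :=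
  match ps with
  | [] => false
  | p :: rest => (pvLookup p "field_name" == some ref) || pvDefined ref rest

-- `check(groups)`: structural recursion building the error list by cons
def pvCheck (params : List (List (String × String))) (groups : List (List (String × String))) : List String :=
  match groups with
  | [] => []
  | group :: rest =>
    let tail := pvCheck params rest
    match pvLookup group "parameter_reference" with
    | some ref =>
      if ref ≠ "" && !(pvDefined ref params) then
        pvMsg ((pvLookup group "group_name").getD "Unknown") ref :: tail
      else tail
    | none => tail

def validate_protocol_to_parameter_refs_py_alt (parameters_data : List (String × List (List (String × String)))) (protocols_data : List (String × List (List (String × String)))) : List String :=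
  let params := (pvLookup parameters_data "parameters").getD []
  pvCheck params ((pvLookup protocols_data "protocol_groups").getD [])

-- ===== PRECONDITION & SPEC =====
def Spec_validate_protocol_to_parameter_refs_py (parameters_data : List (String × List (List (String × String)))) (protocols_data : List (String × List (List (String × String)))) (out : List String) : Prop := out = validate_protocol_to_parameter_refs_py_alt parameters_data protocols_data
instance (parameters_data : List (String × List (List (String × String)))) (protocols_data : List (String × List (List (String × String)))) (out : List String) : Decidable (Spec_validate_protocol_to_parameter_refs_py parameters_data protocols_data out) := by unfold Spec_validate_protocol_to_parameter_refs_py; infer_instance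

-- ===== CLAIM (what is proved, stated in full; the proofs are below) =====
def Claim_equal_validate_protocol_to_parameter_refs_py : Prop := ∀ (parameters_data : List (String × List (List (String × String)))) (protocols_data : List (String × List (List (String × String)))), Dom_validate_protocol_to_parameter_refs_py parameters_data protocols_data → Spec_validate_protocol_to_parameter_refs_py parameters_data protocols_data (validate_protocol_to_parameter_refs_py parameters_data protocols_data)

-- ===== LEMMAS AND PROOFS =====

-- membership in A's accumulated set of field names
theorem mem_pvANames_foldl (params : List (List (String × String))) (s : PySem.Set String) (x : String) :
    x ∈ params.foldl (fun s param =>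
      match pvLookup param "field_name" with
      | some fn => if fn ≠ "" then PySem.Set.add s fn else s
      | none => s) s ↔
    x ∈ s ∨ (x ≠ "" ∧ pvDefined x params = true) := by
  induction params generalizing s with
  | nil => simp [pvDefined]
  | cons p ps ih =>
    simp only [List.foldl_cons, pvDefined, Bool.or_eq_true, ih]
    cases h : pvLookup p "field_name" with
    | none => simp
    | some fn =>
      by_cases hfn : fn = ""
      · subst hfn
        simp
        constructor
        · rintro (hs | hrest)
          · exact Or.inl hs
          · exact Or.inr ⟨hrest.1, Or.inr hrest.2⟩
        · rintro (hs | ⟨hx, (hfx | hrest)⟩)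
          · exact Or.inl hs
          · have hfx' : "" = x := by simpa using hfx
            exact absurd hfx'.symm hx
          · exact Or.inr ⟨hx, hrest⟩
      · simp only [hfn, ne_eq, not_false_iff, if_true, PySem.Set.mem_add]
        constructor
        · rintro ((hs | hx) | hrest)
          · exact Or.inl hs
          · subst hx; exact Or.inr ⟨hfn, Or.inl (by simp)⟩
          · exact Or.inr ⟨hrest.1, Or.inr hrest.2⟩
        · rintro (hs | ⟨hx, (hfx | hrest)⟩)
          · exact Or.inl (Or.inl hs)
          · exact Or.inl (Or.inr (by simpa using (beq_iff_eq.mp (by simpa using hfx)).symm))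
          · exact Or.inr ⟨hx, hrest⟩

-- for a nonempty reference, A's set membership equals B's recursive scan of params
theorem contains_eq_defined (parameters_data : List (String × List (List (String × String)))) (x : String) (hx : x ≠ "") :
    PySem.Set.contains
      (match pvLookup parameters_data "parameters" with
       | some params => pvANames params
       | none => PySem.Set.empty) x =
    pvDefined x ((pvLookup parameters_data "parameters").getD []) := by
  cases h : pvLookup parameters_data "parameters" with
  | none => simp [PySem.Set.empty, pvDefined]
  | some params =>
    simp only [Option.getD_some]
    rcases hb : pvDefined x params with _ | _
    · apply Bool.eq_false_iff.mpr
      intro hc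
      have := (PySem.Set.contains_iff _ _).mp hc
      rw [pvANames, mem_pvANames_foldl] at this
      rcases this with hs | ⟨_, hany⟩
      · simp [PySem.Set.empty] at hs
      · rw [hb] at hany; exact Bool.false_ne_true hany
    · apply (PySem.Set.contains_iff _ _).mpr
      rw [pvANames, mem_pvANames_foldl]
      exact Or.inr ⟨hx, hb⟩

-- A's accumulator loop equals `acc ++` B's recursively built list
theorem foldl_eq_check (parameters_data : List (String × List (List (String × String)))) (groups : List (List (String × String))) (acc : List String) :
    groups.foldl (fun errors group =>
      let group_name := (pvLookup group "group_name").getD "Unknown"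
      match pvLookup group "parameter_reference" with
      | some param_ref =>
        if param_ref ≠ "" then
          if !(PySem.Set.contains
                (match pvLookup parameters_data "parameters" with
                 | some params => pvANames params
                 | none => PySem.Set.empty) param_ref) then
            errors ++ [pvMsg group_name param_ref]
          else errors
        else errors
      | none => errors) acc
    = acc ++ pvCheck ((pvLookup parameters_data "parameters").getD []) groups := by
  induction groups generalizing acc with
  | nil => simp [pvCheck]
  | cons g gs ih =>
    simp only [List.foldl_cons, pvCheck]
    cases hr : pvLookup g "parameter_reference" with
    | none => exact ih acc
    | some ref =>
      dsimp only
      by_cases hx : ref = ""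
      · simp only [hx, ne_eq, not_true_eq_false, if_false, Bool.false_and, decide_false]
        exact ih acc
      · rw [contains_eq_defined parameters_data ref hx]
        simp only [hx, ne_eq, not_false_iff, if_true, decide_true, Bool.true_and]
        cases hd : pvDefined ref ((pvLookup parameters_data "parameters").getD []) with
        | true => simp only [Bool.not_true, Bool.false_eq_true, if_false]; exact ih acc
        | false =>
          simp only [Bool.not_false, if_true]
          rw [ih (acc ++ [pvMsg ((pvLookup g "group_name").getD "Unknown") ref])]
          simp

-- ===== VERDICT (by name: the statement is the Claim_ definition above) =====
theorem validate_protocol_to_parameter_refs_py_spec : Claim_equal_validate_protocol_to_parameter_refs_py := by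
  intro parameters_data protocols_data _
  unfold Spec_validate_protocol_to_parameter_refs_py
  unfold validate_protocol_to_parameter_refs_py validate_protocol_to_parameter_refs_py_alt
  cases hg : pvLookup protocols_data "protocol_groups" with
  | none => rfl
  | some groups =>
    simpa using foldl_eq_check parameters_data groups []
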